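-- pv_equiv track=rewrite | github.com/yujeongkimm/algorithm | 프로그래머스/lv1/155652. 둘만의 암호/둘만의 암호.py | solution
-- ===== SOURCE A (Python) =====
-- def solution(s, skip, index):
--     answer = ''
--     alpha='abcdefghijklmnopqrstuvwxyz'
--     for ch in skip:
--         alpha = alpha.replace(ch, '')
--     for i in s:
--         answer+=alpha[(alpha.index(i)+index)%len(alpha)]
--     return answer
-- ===== SOURCE B (Python) =====
-- def nxt(p, skip):
--     # position (0..25) of the first letter strictly after position p, cyclically, not in skip
--     for d in range(1, 27):
--         q = (p + d) % 26
--         if chr(ord('a') + q) not in skip: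
--             return q
--     raise ValueError('all letters skipped')
--
-- def solution(s, skip, index):
--     n = sum(ch not in skip for ch in 'abcdefghijklmnopqrstuvwxyz')
--     out = []
--     for c in s:
--         if c in skip or not ('a' <= c <= 'z'):
--             raise ValueError('%r is not in the usable alphabet' % c)
--         p = ord(c) - ord('a')
--         for _ in range(index % n):
--             p = nxt(p, skip)
--         out.append(chr(ord('a') + p))
--     return ''.join(out)
-- ===== Notes on version B (the rewrite author's own statement) =====
-- stated objective: alternative
-- what changed: B never builds or indexes the skip-filtered alphabet: it counts the surviving letters once to reduce index mod n, then decodes each character of s by walking the 26-letter cycle forward that many steps, each step jumping to the next non-skipped letter; A instead rebuilds the alphabet with replace and does a linear alpha.index scan plus direct indexing per character.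
import Mathlib
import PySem

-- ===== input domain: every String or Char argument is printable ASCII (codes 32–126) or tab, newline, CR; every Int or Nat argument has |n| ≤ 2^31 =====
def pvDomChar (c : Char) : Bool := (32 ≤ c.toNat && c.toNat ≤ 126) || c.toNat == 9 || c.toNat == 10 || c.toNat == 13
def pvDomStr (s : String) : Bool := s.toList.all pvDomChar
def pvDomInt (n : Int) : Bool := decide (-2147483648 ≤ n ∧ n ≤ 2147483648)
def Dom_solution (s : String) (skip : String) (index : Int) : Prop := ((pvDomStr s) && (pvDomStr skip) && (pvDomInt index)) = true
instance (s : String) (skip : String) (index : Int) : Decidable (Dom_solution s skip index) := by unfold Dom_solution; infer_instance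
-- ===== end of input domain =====

-- B decodes each character by walking the 26-letter cycle forward (index mod n) steps, skipping
-- the skipped letters, instead of A's rebuild-the-alphabet-with-replace plus per-char index scan.

-- ===== PORT A =====
def solution (s : String) (skip : String) (index : Int) : String :=
  let alpha := skip.toList.foldl (fun a ch => PySem.Chars.replace a [ch] [])
                 "abcdefghijklmnopqrstuvwxyz".toList
  let answer := s.toList.foldl (fun answer i =>
      answer ++ [PySem.List.pyGetD alpha
        (PySem.Int.mod (((PySem.List.index? alpha i).getD 0 : Nat) + index) (alpha.length : Int)) 'a']) []
  String.ofList answer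

-- ===== PORT B =====
-- nxt(p, skip): position of the first letter strictly after p (cyclically) that is not in skip.
-- The for-loop with early return is ported as find? over the scanned candidates; the .getD p
-- default corresponds to Python's 'raise ValueError' branch (only reachable outside Pre_).
def nxtP (p : Int) (skip : String) : Int :=
  (((PySem.List.pyRange 1 27 1).map (fun d => PySem.Int.mod (p + d) 26)).find?
      (fun q => !(skip.toList.contains (Char.ofNat (97 + q).toNat)))).getD p

def solution_alt (s : String) (skip : String) (index : Int) : String :=
  let n : Int := "abcdefghijklmnopqrstuvwxyz".toList.foldl
      (fun acc ch => acc + (if !(skip.toList.contains ch) then 1 else 0)) 0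
  let out := s.toList.foldl (fun out c =>
      if skip.toList.contains c || !(97 ≤ c.toNat && c.toNat ≤ 122) then
        out  -- Python raises ValueError here (outside Pre_)
      else
        out ++ [Char.ofNat (97 + ((PySem.List.pyRange 0 (PySem.Int.mod index n) 1).foldl
            (fun p _ => nxtP p skip) ((c.toNat : Int) - 97))).toNat]) ([] : List Char)
  String.ofList out

-- ===== PRECONDITION & SPEC =====
-- Pre_ excludes exactly the inputs on which A raises ValueError (a char of s outside the
-- skip-filtered lowercase alphabet, where alpha.index fails); A returns on every input in Pre_.
def Pre_solution (s : String) (skip : String) (index : Int) : Prop :=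
  (s.toList.all (fun c =>
    ("abcdefghijklmnopqrstuvwxyz".toList.contains c) && !(skip.toList.contains c))) = true
instance (s : String) (skip : String) (index : Int) : Decidable (Pre_solution s skip index) := by
  unfold Pre_solution; infer_instance
def pvWitness_solution : String × String × Int := ("bcd", "a!", 1)

def Spec_solution (s : String) (skip : String) (index : Int) (out : String) : Prop := out = solution_alt s skip index
instance (s : String) (skip : String) (index : Int) (out : String) : Decidable (Spec_solution s skip index out) := by unfold Spec_solution; infer_instance

-- ===== CLAIM (what is proved, stated in full; the proofs are below) =====
def Claim_equal_solution : Prop := ∀ (s : String) (skip : String) (index : Int), Dom_solution s skip index → Pre_solution s skip index → Spec_solution s skip index (solution s skip index)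

-- ===== LEMMAS AND PROOFS =====

-- str.replace(ch, '') removes every occurrence of the single character ch
lemma replace_go_single (c : Char) :
    ∀ (l : List Char) (fuel : Nat) (acc : List Char), l.length ≤ fuel →
      PySem.Chars.replace.go [c] [] fuel l acc = acc.reverse ++ l.filter (· ≠ c) := by
  intro l
  induction l with
  | nil => intro fuel acc _; cases fuel <;> simp [PySem.Chars.replace.go]
  | cons x t ih =>
      intro fuel acc h
      cases fuel with
      | zero => simp at h
      | succ fuel =>
          by_cases hx : c = x
          · subst hx
            rw [show PySem.Chars.replace.go [c] [] (fuel+1) (c :: t) acc = PySem.Chars.replace.go [c] [] fuel t acc from by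
              simp [PySem.Chars.replace.go, List.isPrefixOf]]
            rw [ih fuel acc (by simpa using h)]
            simp
          · have hpre : [c].isPrefixOf (x :: t) = false := by
              simp [List.isPrefixOf]; intro h'; exact hx h'
            simp only [PySem.Chars.replace.go, hpre, Bool.false_eq_true, if_false]
            rw [ih fuel (x :: acc) (by simpa using h)]
            simp [Ne.symm hx]

lemma replace_single (cs : List Char) (c : Char) :
    PySem.Chars.replace cs [c] [] = cs.filter (· ≠ c) := by
  simpa using replace_go_single c cs cs.length [] le_rfl

-- the skip loop of A builds exactly the skip-filtered alphabet
lemma foldl_replace_eq_filter :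
    ∀ (sk base : List Char),
      sk.foldl (fun a ch => PySem.Chars.replace a [ch] []) base
        = base.filter (fun c => !(sk.contains c)) := by
  intro sk
  induction sk with
  | nil => intro base; simp
  | cons x xs ih =>
      intro base
      simp only [List.foldl_cons]
      rw [replace_single, ih, List.filter_filter]
      apply List.filter_congr
      intro a _
      by_cases h : a = x <;> simp [h]

-- position j ↦ letter chr(97+j)
def pvChar (j : Nat) : Char := Char.ofNat (97 + j)

-- the kept positions 0..25, in order
def pvKeep (skip : String) (j : Nat) : Bool := !(skip.toList.contains (pvChar j))
def pvP (skip : String) : List Nat := (List.range 26).filter (pvKeep skip)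

lemma pvChar_toNat (j : Nat) (hj : j < 26) : (pvChar j).toNat = 97 + j := by
  interval_cases j <;> decide

lemma abc_eq : "abcdefghijklmnopqrstuvwxyz".toList = (List.range 26).map pvChar := by decide

lemma alpha_eq (skip : String) :
    "abcdefghijklmnopqrstuvwxyz".toList.filter (fun c => !(skip.toList.contains c))
      = (pvP skip).map pvChar := by
  rw [abc_eq, List.filter_map]
  rfl

lemma pvP_nodup (skip : String) : (pvP skip).Nodup :=
  (List.nodup_range).filter _

lemma pvP_mem_lt (skip : String) {j : Nat} (h : j ∈ pvP skip) : j < 26 :=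
  List.mem_range.mp (List.mem_of_mem_filter h)

-- index? of the i-th element of a nodup list is i
lemma index?_getElem_of_nodup {α : Type} [DecidableEq α] :
    ∀ (l : List α), l.Nodup → ∀ (i : Nat) (h : i < l.length),
      PySem.List.index? l (l[i]) = some i := by
  intro l
  induction l with
  | nil => intro _ i h; simp at h
  | cons a t ih =>
      intro hnd i h
      cases i with
      | zero => simpa using PySem.List.index?_cons_self a t
      | succ i =>
          have hit : i < t.length := by simpa using h
          have ha : a ≠ t[i]'hit := by
            intro he
            exact (List.nodup_cons.mp hnd).1 (he ▸ List.getElem_mem _)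
          rw [show ((a :: t)[i+1]'h = t[i]'hit) from rfl,
              PySem.List.index?_cons_of_ne t ha,
              ih (List.nodup_cons.mp hnd).2 i hit]
          rfl

-- find? through the Nat→Int embedding of the candidate list
lemma find?_map_cast (pred : Int → Bool) :
    ∀ (l : List Nat),
      (l.map (Nat.cast : Nat → Int)).find? pred
        = (l.find? (fun (j : Nat) => pred ((j : Nat) : Int))).map (Nat.cast : Nat → Int) := by
  intro l
  induction l with
  | nil => rfl
  | cons a t ih =>
      by_cases h : pred (a : Int) = true
      · rw [List.map_cons, List.find?_cons_of_pos h,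
            List.find?_cons_of_pos (p := fun (j : Nat) => pred ((j : Nat) : Int)) (a := a) (l := t) h]
        rfl
      · rw [List.map_cons, List.find?_cons_of_neg h,
            List.find?_cons_of_neg (p := fun (j : Nat) => pred ((j : Nat) : Int)) (a := a) (l := t) h]
        exact ih

-- find? is the head of the filtered list
lemma find?_eq_head?_filter {α : Type} (p : α → Bool) :
    ∀ (l : List α), l.find? p = (l.filter p).head? := by
  intro l
  induction l with
  | nil => rfl
  | cons a t ih =>
      by_cases h : p a = true
      · rw [List.find?_cons_of_pos h, List.filter_cons_of_pos h]; rfl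
      · rw [List.find?_cons_of_neg h, List.filter_cons_of_neg h]; exact ih

-- the candidate scan of nxt is the 26 positions rotated to start just after p
lemma scan_eq_rot (p : Nat) (hp : p < 26) :
    (PySem.List.pyRange 1 27 1).map (fun d => PySem.Int.mod ((p : Int) + d) 26)
      = (((List.range 26).drop (p+1)) ++ ((List.range 26).take (p+1))).map
          (Nat.cast : Nat → Int) := by
  interval_cases p <;> decide

-- one walk step from the i-th kept position lands on the (i+1 mod n)-th kept position
lemma nxtP_step (skip : String) (p i : Nat)
    (hi : PySem.List.index? (pvP skip) p = some i) :
    nxtP (p : Int) skip = (((pvP skip).getD ((i+1) % (pvP skip).length) 0 : Nat) : Int) := by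
  have hpmem : p ∈ pvP skip := by
    obtain ⟨hlt, hg, -⟩ := PySem.List.getElem_of_index?_eq_some hi
    exact hg ▸ List.getElem_mem _
  have hp : p < 26 := pvP_mem_lt skip hpmem
  have hKp : pvKeep skip p = true := List.of_mem_filter hpmem
  have hcast : ∀ j : Nat, ((97 : Int) + (j : Int)).toNat = 97 + j := by intro j; omega
  unfold nxtP
  rw [scan_eq_rot p hp, find?_map_cast]
  have hpred : (fun j : Nat => !(skip.toList.contains (Char.ofNat (97 + (j:Int)).toNat)))
      = pvKeep skip := by
    funext j
    simp only [hcast j]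
    rfl
  rw [hpred, find?_eq_head?_filter, List.filter_append]
  -- split the range at p+1
  have htake : (List.range 26).take (p+1) = List.range (p+1) := by
    rw [List.take_range]; congr 1; omega
  rw [htake]
  have hsplit : pvP skip
      = (List.range (p+1)).filter (pvKeep skip)
        ++ ((List.range 26).drop (p+1)).filter (pvKeep skip) := by
    rw [pvP, ← List.filter_append, ← htake, List.take_append_drop]
  have hA : (List.range (p+1)).filter (pvKeep skip)
      = (List.range p).filter (pvKeep skip) ++ [p] := by
    rw [List.range_succ, List.filter_append]
    simp [hKp]
  -- the index of p is the number of kept positions below p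
  have hi' : i = ((List.range p).filter (pvKeep skip)).length := by
    have hnotmem : p ∉ (List.range p).filter (pvKeep skip) := by
      intro hmem
      have := List.mem_range.mp (List.mem_of_mem_filter hmem)
      omega
    have h1 : PySem.List.index? (pvP skip) p
        = some ((List.range p).filter (pvKeep skip)).length := by
      rw [hsplit, hA]
      rw [PySem.List.index?_append_of_mem
            (((List.range 26).drop (p+1)).filter (pvKeep skip)) (by simp)]
      exact PySem.List.index?_append_singleton_self _ p hnotmem
    rw [h1] at hi
    exact (Option.some_inj.mp hi).symm
  have hAlen : ((List.range (p+1)).filter (pvKeep skip)).length = i + 1 := by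
    rw [hA]; simp [hi']
  set B := ((List.range 26).drop (p+1)).filter (pvKeep skip) with hB
  set A := (List.range (p+1)).filter (pvKeep skip) with hA'
  have hPlen : (pvP skip).length = i + 1 + B.length := by
    rw [hsplit]; simp [hAlen]
  cases hBc : B with
  | nil =>
      have hn : (pvP skip).length = i + 1 := by rw [hPlen, hBc]; simp
      have hmod : (i+1) % (pvP skip).length = 0 := by rw [hn]; simp
      have hPA : pvP skip = A := by rw [hsplit, hBc]; simp
      rw [hmod]
      have hPne : pvP skip ≠ [] := List.ne_nil_of_mem hpmem
      cases hPc : pvP skip with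
      | nil => exact absurd hPc hPne
      | cons x t =>
          have : A = x :: t := by rw [← hPA, hPc]
          rw [this]
          simp
  | cons b bt =>
      have hlt : i + 1 < (pvP skip).length := by rw [hPlen, hBc]; simp
      have hmod : (i+1) % (pvP skip).length = i + 1 := Nat.mod_eq_of_lt hlt
      have hdrop : (pvP skip).drop (i+1) = B := by
        rw [hsplit, ← hAlen]; exact List.drop_left
      have hhead : ((pvP skip).drop (i+1)).head? = (pvP skip)[i+1]? := List.head?_drop
      rw [hmod]
      have : (pvP skip).getD (i+1) 0 = b := by
        have := hhead
        rw [hdrop, hBc] at this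
        simp [List.getD, this.symm]
      rw [this]
      simp

-- folding a constant-step body over any list iterates the step
lemma foldl_const_eq_iterate {α β : Type} (f : α → α) :
    ∀ (l : List β) (x : α), l.foldl (fun a _ => f a) x = f^[l.length] x := by
  intro l
  induction l with
  | nil => intro x; rfl
  | cons a t ih => intro x; simp [ih, Function.iterate_succ_apply]

-- m walk steps from the i-th kept position land on the (i+m mod n)-th kept position
lemma nxtP_iterate (skip : String) :
    ∀ (m i : Nat), i < (pvP skip).length →
      (fun p => nxtP p skip)^[m] (((pvP skip).getD i 0 : Nat) : Int)
        = (((pvP skip).getD ((i+m) % (pvP skip).length) 0 : Nat) : Int) := by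
  intro m
  induction m with
  | zero =>
      intro i hi
      simp [Nat.mod_eq_of_lt hi]
  | succ m ih =>
      intro i hi
      have hn : 0 < (pvP skip).length := Nat.lt_of_le_of_lt (Nat.zero_le i) hi
      have hgetD : (pvP skip).getD i 0 = (pvP skip)[i] := by
        simp [List.getD, List.getElem?_eq_getElem hi]
      have hidx : PySem.List.index? (pvP skip) ((pvP skip).getD i 0) = some i := by
        rw [hgetD]; exact index?_getElem_of_nodup (pvP skip) (pvP_nodup skip) i hi
      rw [Function.iterate_succ_apply]
      rw [show (fun p => nxtP p skip)^[m] (nxtP (((pvP skip).getD i 0 : Nat) : Int) skip)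
            = (fun p => nxtP p skip)^[m]
                (((pvP skip).getD ((i+1) % (pvP skip).length) 0 : Nat) : Int) from by
        rw [nxtP_step skip ((pvP skip).getD i 0) i hidx]]
      rw [ih ((i+1) % (pvP skip).length) (Nat.mod_lt _ hn)]
      congr 2
      rw [Nat.mod_add_mod]
      congr 1
      omega

-- B's one-pass count is the length of the filtered alphabet
lemma foldl_count_eq_length (sk : List Char) :
    ∀ (l : List Char) (acc : Int),
      l.foldl (fun acc ch => acc + (if !(sk.contains ch) then 1 else 0)) acc
        = acc + ((l.filter (fun c => !(sk.contains c))).length : Int) := by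
  intro l
  induction l with
  | nil => intro acc; simp
  | cons a t ih =>
      intro acc
      rw [List.foldl_cons, ih]
      by_cases h : sk.contains a = true
      · have h' : a ∈ sk := by simpa using h
        simp [h']
      · have h' : a ∉ sk := by simpa using h
        simp [h']
        ring

-- under the guard (no char raises), B's loop is a plain map
lemma foldl_guard_eq_map (bad : Char → Bool) (g : Char → Char) :
    ∀ (l : List Char) (acc : List Char), (∀ c ∈ l, bad c = false) →
      l.foldl (fun out c => if bad c then out else out ++ [g c]) acc = acc ++ l.map g := by
  intro l
  induction l with
  | nil => intro acc _; simp
  | cons a t ih =>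
      intro acc hgood
      rw [List.foldl_cons, if_neg (by simp [hgood a (by simp)]), ih _ (fun c hc => hgood c (by simp [hc]))]
      simp

theorem solution_spec : Claim_equal_solution := by
  intro s skip index _ hpre
  unfold Spec_solution solution solution_alt
  simp only []
  rw [foldl_replace_eq_filter, foldl_count_eq_length]
  rw [alpha_eq skip]
  simp only [Int.zero_add]
  set P := pvP skip with hP
  set n := P.length with hn
  rw [PySem.List.foldl_append_singleton_eq_map]
  have hgood : ∀ c ∈ s.toList,
      (skip.toList.contains c || !(97 ≤ c.toNat && c.toNat ≤ 122)) = false := by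
    intro c hc
    have h := List.all_eq_true.mp hpre c hc
    rcases Bool.and_eq_true_iff.mp h with ⟨h1, h2⟩
    have hcL : c ∈ "abcdefghijklmnopqrstuvwxyz".toList := by simpa using h1
    rw [abc_eq] at hcL
    rcases List.mem_map.mp hcL with ⟨j, hj, rfl⟩
    have hj26 : j < 26 := List.mem_range.mp hj
    have ht := pvChar_toNat j hj26
    have h2' : skip.toList.contains (pvChar j) = false := by simpa using h2
    have hb : (97 ≤ (pvChar j).toNat && (pvChar j).toNat ≤ 122) = true := by
      rw [Bool.and_eq_true]
      constructor <;> simp [ht] <;> omega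
    rw [h2', hb]
    rfl
  rw [foldl_guard_eq_map _ _ _ _ hgood]
  simp only [List.nil_append]
  congr 1
  apply List.map_congr_left
  intro c hc
  -- c is a kept letter: c = pvChar p with p ∈ P at index k
  have hmem : c ∈ P.map pvChar := by
    rw [hP, ← alpha_eq skip, List.mem_filter]
    have h := List.all_eq_true.mp hpre c hc
    rcases Bool.and_eq_true_iff.mp h with ⟨h1, h2⟩
    exact ⟨by simpa using h1, h2⟩
  rcases Option.isSome_iff_exists.mp ((PySem.List.index?_isSome_iff _ c).mpr hmem) with ⟨k, hk⟩
  obtain ⟨hklt, hgk, -⟩ := PySem.List.getElem_of_index?_eq_some hk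
  have hklt' : k < n := by simpa using hklt
  have hn0 : 0 < n := Nat.lt_of_le_of_lt (Nat.zero_le k) hklt'
  set p := P[k]'(by simpa using hklt') with hpdef
  have hc_eq : c = pvChar p := by
    rw [← hgk]; simp [hpdef]
  have hplt : p < 26 := pvP_mem_lt skip (by exact List.getElem_mem _)
  have hcN : (c.toNat : Int) - 97 = (p : Int) := by
    rw [hc_eq, pvChar_toNat p hplt]; push_cast; ring
  -- the A side: alpha[(k + index) % n]
  rw [hk]
  simp only [Option.getD_some]
  have hnpos : (0:Int) < (n:Int) := by exact_mod_cast hn0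
  have hlen : ((P.map pvChar).length : Int) = (n : Int) := by simp [hn]
  rw [hlen]
  set m := PySem.Int.mod ((k : Nat) + index) (n : Int) with hm
  have hm0 : 0 ≤ m := PySem.Int.mod_nonneg _ hnpos
  have hmlt : m < n := PySem.Int.mod_lt _ hnpos
  rw [PySem.List.pyGetD_eq_getElem _ _ hm0 (by simpa using hmlt)]
  -- the B side: iterate the walk K = index mod n times from p
  set K := PySem.Int.mod index (n : Int) with hK
  have hK0 : 0 ≤ K := PySem.Int.mod_nonneg _ hnpos
  rw [hcN]
  rw [foldl_const_eq_iterate]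
  rw [PySem.List.length_pyRange_one]
  have hgetDk : P.getD k 0 = p := by
    rw [hpdef]
    simp [List.getD, List.getElem?_eq_getElem (show k < P.length from by simpa using hklt')]
  rw [show ((p : Nat) : Int) = ((P.getD k 0 : Nat) : Int) from by rw [hgetDk]]
  rw [nxtP_iterate skip ((K - 0).toNat) k (by simpa using hklt')]
  -- the two indices agree
  have hmm : m.toNat = (k + (K - 0).toNat) % n := by
    rw [show (K - 0).toNat = K.toNat from by norm_num]
    have hKt : ((K.toNat : Nat) : Int) = K := Int.toNat_of_nonneg hK0
    have hemod : m = ((k + K.toNat : Nat) : Int) % (n : Int) := by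
      rw [hm, PySem.Int.mod_eq_emod_of_pos hnpos]
      push_cast [hKt]
      rw [hK, PySem.Int.mod_eq_emod_of_pos hnpos]
      conv_lhs => rw [Int.add_emod]
      conv_rhs => rw [Int.add_emod]
      rw [Int.emod_emod_of_dvd _ (dvd_refl _)]
    have : m = (((k + K.toNat) % n : Nat) : Int) := by
      rw [hemod, Int.natCast_mod]
    rw [this]
    exact Int.toNat_natCast _
  rw [show (K - 0).toNat = K.toNat from by norm_num] at *
  rw [← hmm]
  -- both sides are pvChar of the same position
  have hmlt'' : m.toNat < P.length := by omega
  have hval : (P.map pvChar)[m.toNat]'(by simpa using hmlt'')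
      = pvChar (P[m.toNat]'hmlt'') := by
    simp
  rw [hval]
  have hgd : P.getD m.toNat 0 = P[m.toNat]'hmlt'' := by
    simp [List.getD, List.getElem?_eq_getElem hmlt'']
  rw [hgd]
  rw [pvChar, show ((97:Int) + ((P[m.toNat]'hmlt'' : Nat) : Int)).toNat
        = 97 + P[m.toNat]'hmlt'' from by omega]
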